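-- pv_equiv track=rewrite | github.com/DimSap/Young-Yandex_algorithms | contest2/E_cow_championship/main.py | get_vasya_score
-- ===== SOURCE A (Python) =====
-- def get_vasya_score(seq):
--     first_score = seq[0]
--     vasya_score = 0
--     for i in range(1, len(seq) - 1):
--         if seq[i] > first_score:
--             first_score = seq[i]
--             vasya_score = 0
--         elif (seq[i] % 5 == 0 and seq[i] % 2 == 1) and \
--               seq[i+1] < seq[i] and \
--               seq[i] >= vasya_score:
--             vasya_score = seq[i]
--     return vasya_score
-- ===== SOURCE B (Python) =====
-- def get_vasya_score(seq):
--     # two-pass: first locate the last "reset" (new running maximum), then take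
--     # the best qualifying score among the elements after it
--     m = seq[0]
--     r = 0
--     n = len(seq)
--     for i in range(1, n - 1):
--         if seq[i] > m:
--             m = seq[i]
--             r = i
--     return max([0] + [seq[i] for i in range(r + 1, n - 1)
--                       if seq[i] % 5 == 0 and seq[i] % 2 == 1 and seq[i + 1] < seq[i]])
-- ===== Notes on version B (the rewrite author's own statement) =====
-- stated objective: alternative
-- what changed: A's fused single loop (running max with inline conditional score accumulation and resets) is split into two separate passes: first find the index of the last running-max reset, then take the max, floored at zero, of a filtered comprehension over the elements after that index.
import Mathlib
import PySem

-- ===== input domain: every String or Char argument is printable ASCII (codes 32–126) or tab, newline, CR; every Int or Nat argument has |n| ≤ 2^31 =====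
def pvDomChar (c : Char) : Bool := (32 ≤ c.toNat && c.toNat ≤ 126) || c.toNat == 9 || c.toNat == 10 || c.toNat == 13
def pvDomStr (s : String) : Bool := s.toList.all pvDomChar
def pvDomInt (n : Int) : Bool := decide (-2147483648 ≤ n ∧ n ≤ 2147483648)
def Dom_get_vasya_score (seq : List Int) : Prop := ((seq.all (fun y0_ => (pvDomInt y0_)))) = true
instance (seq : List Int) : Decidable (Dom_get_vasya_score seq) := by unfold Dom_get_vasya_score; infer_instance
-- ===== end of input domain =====

-- B replaces A's fused single scan by two separate passes (find the last running-max reset,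
-- then a max over a filtered comprehension after it); objective: alternative decomposition.

-- ===== PORT A =====
-- literal transliteration of A's single fused loop over range(1, len-1)
def get_vasya_score (seq : List Int) : Int :=
  let st :=
    (PySem.List.pyRange 1 ((seq.length : Int) - 1) 1).foldl
      (fun (st : Int × Int) i =>
        if PySem.List.pyGetD seq i 0 > st.1 then
          (PySem.List.pyGetD seq i 0, 0)
        else if PySem.Int.mod (PySem.List.pyGetD seq i 0) 5 = 0 ∧
                PySem.Int.mod (PySem.List.pyGetD seq i 0) 2 = 1 ∧
                PySem.List.pyGetD seq (i + 1) 0 < PySem.List.pyGetD seq i 0 ∧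
                PySem.List.pyGetD seq i 0 ≥ st.2 then
          (st.1, PySem.List.pyGetD seq i 0)
        else st)
      (PySem.List.pyGetD seq 0 0, 0)
  st.2

-- ===== PORT B =====
-- literal transliteration of Source B: pass 1 finds (last reset index r, running max m);
-- pass 2 takes the max, floored at zero, of the filtered comprehension after index r
def get_vasya_score_alt (seq : List Int) : Int :=
  let n : Int := seq.length
  let rm :=
    (PySem.List.pyRange 1 (n - 1) 1).foldl
      (fun (rm : Int × Int) i =>
        if PySem.List.pyGetD seq i 0 > rm.2 then (i, PySem.List.pyGetD seq i 0) else rm)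
      (0, PySem.List.pyGetD seq 0 0)
  let cands :=
    (PySem.List.pyRange (rm.1 + 1) (n - 1) 1).filterMap
      (fun i =>
        if PySem.Int.mod (PySem.List.pyGetD seq i 0) 5 = 0 ∧
           PySem.Int.mod (PySem.List.pyGetD seq i 0) 2 = 1 ∧
           PySem.List.pyGetD seq (i + 1) 0 < PySem.List.pyGetD seq i 0 then
          some (PySem.List.pyGetD seq i 0)
        else none)
  (PySem.List.max? ((0 : Int) :: cands) (fun y => y)).getD 0

-- ===== PRECONDITION & SPEC =====
-- Pre_ excludes only the empty list, on which A raises IndexError at seq[0].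
def Pre_get_vasya_score (seq : List Int) : Prop := seq ≠ []
instance (seq : List Int) : Decidable (Pre_get_vasya_score seq) := by
  unfold Pre_get_vasya_score; infer_instance
def pvWitness_get_vasya_score : List Int := [3, 15, 4, 2]

def Spec_get_vasya_score (seq : List Int) (out : Int) : Prop := out = get_vasya_score_alt seq
instance (seq : List Int) (out : Int) : Decidable (Spec_get_vasya_score seq out) := by unfold Spec_get_vasya_score; infer_instance

-- ===== CLAIM (what is proved, stated in full; the proofs are below) =====
def Claim_equal_get_vasya_score : Prop := ∀ (seq : List Int), Dom_get_vasya_score seq → Pre_get_vasya_score seq → Spec_get_vasya_score seq (get_vasya_score seq)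

-- ===== LEMMAS AND PROOFS =====

-- value at index i and the qualification test, shared vocabulary of the proofs
def pvV (seq : List Int) (i : Int) : Int := PySem.List.pyGetD seq i 0

def pvQ (seq : List Int) (i : Int) : Prop :=
  PySem.Int.mod (pvV seq i) 5 = 0 ∧ PySem.Int.mod (pvV seq i) 2 = 1 ∧
    pvV seq (i + 1) < pvV seq i

def pvQb (seq : List Int) (i : Int) : Bool :=
  decide (PySem.Int.mod (pvV seq i) 5 = 0) &&
    decide (PySem.Int.mod (pvV seq i) 2 = 1) && decide (pvV seq (i + 1) < pvV seq i)

lemma pvQb_iff (seq : List Int) (i : Int) : pvQb seq i = true ↔ pvQ seq i := by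
  simp [pvQb, pvQ, and_assoc]

-- A's loop step and B's first-pass step
def pvAstep (seq : List Int) (st : Int × Int) (i : Int) : Int × Int :=
  if pvV seq i > st.1 then (pvV seq i, 0)
  else if PySem.Int.mod (pvV seq i) 5 = 0 ∧ PySem.Int.mod (pvV seq i) 2 = 1 ∧
          pvV seq (i + 1) < pvV seq i ∧ pvV seq i ≥ st.2 then (st.1, pvV seq i)
  else st

lemma pvAstep_eq (seq : List Int) (st : Int × Int) (i : Int) :
    pvAstep seq st i =
      if pvV seq i > st.1 then (pvV seq i, 0)
      else if pvQb seq i ∧ pvV seq i ≥ st.2 then (st.1, pvV seq i)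
      else st := by
  have hiff :
      (PySem.Int.mod (pvV seq i) 5 = 0 ∧ PySem.Int.mod (pvV seq i) 2 = 1 ∧
        pvV seq (i + 1) < pvV seq i ∧ pvV seq i ≥ st.2) ↔
      ((pvQb seq i = true) ∧ pvV seq i ≥ st.2) := by
    rw [pvQb_iff]; simp [pvQ, and_assoc]
  simp only [pvAstep, hiff]

def pvBstep (seq : List Int) (rm : Int × Int) (i : Int) : Int × Int :=
  if pvV seq i > rm.2 then (i, pvV seq i) else rm

-- suffix of the index list strictly after the last reset (none = no reset occurs)
def pvT (seq : List Int) (L : List Int) (M : Int) : Option (List Int) :=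
  match L with
  | [] => none
  | i :: L' =>
    if pvV seq i > M then some ((pvT seq L' (pvV seq i)).getD L')
    else pvT seq L' M

-- A's elif as a standalone fold
def pvQmax (seq : List Int) (L : List Int) (s : Int) : Int :=
  L.foldl (fun s i => if pvQb seq i ∧ pvV seq i ≥ s then pvV seq i else s) s

lemma pvAfold_char (seq : List Int) :
    ∀ (L : List Int) (M s : Int),
      (L.foldl (pvAstep seq) (M, s)).2 =
        match pvT seq L M with
        | some t => pvQmax seq t 0
        | none => pvQmax seq L s := by
  intro L
  induction L with
  | nil => intro M s; simp [pvT, pvQmax]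
  | cons i L ih =>
    intro M s
    by_cases h : pvV seq i > M
    · simp only [List.foldl_cons, pvAstep_eq, if_pos h, pvT]
      rw [ih (pvV seq i) 0]
      cases hT : pvT seq L (pvV seq i) <;> simp
    · by_cases hq : pvQb seq i ∧ pvV seq i ≥ s
      · simp only [List.foldl_cons, pvAstep_eq, if_neg h, if_pos hq, pvT]
        rw [ih M (pvV seq i)]
        cases hT : pvT seq L M <;> simp [pvQmax, hq]
      · simp only [List.foldl_cons, pvAstep_eq, if_neg h, if_neg hq, pvT]
        rw [ih M s]
        cases hT : pvT seq L M <;> simp [pvQmax, hq]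

lemma pvBfold_char (seq : List Int) :
    ∀ (n : Nat) (a b r0 M : Int), (b - a).toNat = n →
      match pvT seq (PySem.List.pyRange a b 1) M with
      | none => (PySem.List.pyRange a b 1).foldl (pvBstep seq) (r0, M) = (r0, M)
      | some t =>
          PySem.List.pyRange
            (((PySem.List.pyRange a b 1).foldl (pvBstep seq) (r0, M)).1 + 1) b 1 = t := by
  intro n
  induction n with
  | zero =>
    intro a b r0 M hn
    have hb : b ≤ a := by omega
    simp [PySem.List.pyRange_one_eq_nil hb, pvT]
  | succ n ih =>
    intro a b r0 M hn
    have hab : a < b := by omega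
    rw [PySem.List.pyRange_one_cons hab]
    by_cases h : pvV seq a > M
    · simp only [pvT, if_pos h, List.foldl_cons, pvBstep]
      have := ih (a + 1) b a (pvV seq a) (by omega)
      cases hT : pvT seq (PySem.List.pyRange (a + 1) b 1) (pvV seq a) with
      | none =>
        simp only [hT] at this
        simp [this]
      | some t =>
        simp only [hT] at this
        simp [this]
    · simp only [pvT, if_neg h, List.foldl_cons, pvBstep]
      have := ih (a + 1) b r0 M (by omega)
      cases hT : pvT seq (PySem.List.pyRange (a + 1) b 1) M with
      | none => simp only [hT] at this ⊢; simp [this]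
      | some t => simp only [hT] at this ⊢; simp [this]

-- pvQmax from a start value s is the running max of s and the qualifying values
lemma pvQmax_eq_foldl_max (seq : List Int) :
    ∀ (L : List Int) (s : Int),
      pvQmax seq L s =
        (L.filterMap (fun i => if pvQb seq i then some (pvV seq i) else none)).foldl max s := by
  intro L
  induction L with
  | nil => intro s; simp [pvQmax]
  | cons i L ih =>
    intro s
    by_cases hq : pvQb seq i
    · have hstep : (if pvQb seq i ∧ pvV seq i ≥ s then pvV seq i else s) = max s (pvV seq i) := by
        by_cases hge : pvV seq i ≥ s
        · rw [if_pos ⟨hq, hge⟩]; omega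
        · rw [if_neg (fun hc => hge hc.2)]; omega
      rw [pvQmax, List.foldl_cons, hstep]
      simp only [List.filterMap_cons, hq, if_true, List.foldl_cons]
      simpa [pvQmax] using ih (max s (pvV seq i))
    · simp only [pvQmax, List.foldl_cons, List.filterMap_cons, hq]
      simpa [pvQmax, hq] using ih s

theorem pv_main (seq : List Int) :
    get_vasya_score seq = get_vasya_score_alt seq := by
  have hA :
      get_vasya_score seq =
        ((PySem.List.pyRange 1 ((seq.length : Int) - 1) 1).foldl (pvAstep seq)
          (pvV seq 0, 0)).2 := by
    unfold get_vasya_score pvAstep pvV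
    rfl
  have hB1 :
      get_vasya_score_alt seq =
        (PySem.List.max?
          ((0 : Int) ::
            (PySem.List.pyRange
              (((PySem.List.pyRange 1 ((seq.length : Int) - 1) 1).foldl (pvBstep seq)
                  (0, pvV seq 0)).1 + 1) ((seq.length : Int) - 1) 1).filterMap
              (fun i =>
                if PySem.Int.mod (pvV seq i) 5 = 0 ∧ PySem.Int.mod (pvV seq i) 2 = 1 ∧
                    pvV seq (i + 1) < pvV seq i then some (pvV seq i) else none))
          (fun y => y)).getD 0 := by
    unfold get_vasya_score_alt pvBstep pvV
    rfl
  have hQfun :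
      (fun i =>
        if PySem.Int.mod (pvV seq i) 5 = 0 ∧ PySem.Int.mod (pvV seq i) 2 = 1 ∧
            pvV seq (i + 1) < pvV seq i then some (pvV seq i) else none) =
        (fun i => if pvQb seq i then some (pvV seq i) else none) := by
    funext i
    by_cases h : pvQb seq i = true
    · have h' := (pvQb_iff seq i).mp h
      rw [pvQ] at h'
      rw [if_pos h', if_pos h]
    · have h' : ¬ (PySem.Int.mod (pvV seq i) 5 = 0 ∧ PySem.Int.mod (pvV seq i) 2 = 1 ∧
          pvV seq (i + 1) < pvV seq i) := fun hc => h ((pvQb_iff seq i).mpr (by rw [pvQ]; exact hc))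
      rw [if_neg h', if_neg h]
  rw [hA, hB1, hQfun, PySem.List.max?_id_cons]
  simp only [Option.getD_some]
  rw [pvAfold_char seq _ (pvV seq 0) 0]
  have hBc := pvBfold_char seq ((seq.length : Int) - 1 - 1).toNat 1
    ((seq.length : Int) - 1) 0 (pvV seq 0) rfl
  cases hT : pvT seq (PySem.List.pyRange 1 ((seq.length : Int) - 1) 1) (pvV seq 0) with
  | none =>
    simp only [hT] at hBc ⊢
    rw [hBc]
    simp only [Int.zero_add]
    rw [pvQmax_eq_foldl_max]
  | some t =>
    simp only [hT] at hBc ⊢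
    rw [hBc]
    rw [pvQmax_eq_foldl_max]

-- ===== VERDICT (by name: the statement is the Claim_ definition above) =====
theorem get_vasya_score_spec : Claim_equal_get_vasya_score := by
  intro seq _ _
  unfold Spec_get_vasya_score
  exact pv_main seq
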